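-- pv_equiv track=rewrite | github.com/Gaju27/Assignment_17_B | count_unique_path_in_nary_tree.py | findTotalPath
-- ===== SOURCE A (Python) =====
-- mod = int(1e9 + 7)
--
-- def findTotalPath(X, n, dp):
--     # If the path of the sum
--     # from the root to current
--     # node is stored in sum
--     if (X == 0):
--         return 1
--
--     ans = 0
--
--     # If already commputed
--     if (dp[X] != -1):
--         return dp[X]
--
--     # Count different no of paths
--     # using all possible ways
--     for i in range(1, min(X, n) + 1):
--         ans = ans + findTotalPath(X - i, n, dp) % mod;
--         ans %= mod;
--
--     # Return total no of paths
--     dp[X] = ans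
--     return ans
-- ===== SOURCE B (Python) =====
-- mod = int(1e9 + 7)
--
-- def findTotalPath(X, n, dp):
--     # Bottom-up table with a sliding-window running sum instead of memoized
--     # top-down recursion.  (Return value only: unlike A, this does not write
--     # computed entries back into dp.)
--     if X < 0:
--         return 0
--     if X > 0 and dp[X] != -1:
--         return dp[X]                  # already stored in the memo table
--     f = [1]                           # f[k] = number of paths summing to k
--     window = 1 if n >= 1 else 0       # running sum of f over the last min(k, n) entries
--     for k in range(1, X + 1):
--         fk = dp[k] if dp[k] != -1 else window % mod
--         if n >= 1:
--             window += fk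
--             if k >= n:
--                 window -= f[k - n]
--         f.append(fk)
--     return f[X]
-- ===== Notes on version B (the rewrite author's own statement) =====
-- stated objective: alternative
-- what changed: A's memoized top-down recursion (which mutates dp in place and re-sums up to min(X,n) memo values per level) is replaced by an iterative bottom-up table with a sliding-window running sum, one constant-work step per table entry.
-- intended difference: For X < 0 with -X <= len(dp), A returns whatever Python's negative-index wraparound finds in the memo table (dp[len+X], or 0 when that entry is the -1 sentinel); B returns 0, the intended number of paths to a negative sum. — e.g. on findTotalPath(-1, 1, [5]): A returns 5, B returns 0
import Mathlib
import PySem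

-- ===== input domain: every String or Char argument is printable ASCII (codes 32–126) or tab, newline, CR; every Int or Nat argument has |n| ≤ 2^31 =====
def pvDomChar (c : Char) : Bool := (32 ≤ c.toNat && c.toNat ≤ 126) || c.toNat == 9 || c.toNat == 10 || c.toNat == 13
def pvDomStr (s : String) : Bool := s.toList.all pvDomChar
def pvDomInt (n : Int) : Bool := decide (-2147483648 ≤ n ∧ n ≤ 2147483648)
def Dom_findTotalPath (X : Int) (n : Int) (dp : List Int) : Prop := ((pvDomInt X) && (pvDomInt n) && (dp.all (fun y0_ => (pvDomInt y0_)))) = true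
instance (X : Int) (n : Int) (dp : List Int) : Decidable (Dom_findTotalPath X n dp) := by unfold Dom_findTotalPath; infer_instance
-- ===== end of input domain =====

-- B replaces A's memoized top-down recursion by a bottom-up table with a
-- sliding-window running sum; equivalence is about the RETURN value only:
-- A fills computed memo entries back into dp in place, B does not mutate dp.

-- ===== PORT A =====
def pvMod : Int := 1000000007

-- fuel makes A's recursion total; X.toNat + 1 is always enough (each recursive call
-- strictly decreases X toward 0 and fuel by 1).
def pvGoA : Nat → Int → Int → List Int → Option (Int × List Int)
  | 0, _, _, _ => none
  | fuel+1, X, n, dp =>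
    if X = 0 then some (1, dp)
    else
      match PySem.List.pyGet? dp X with
      | none => none                     -- dp[X] raises IndexError
      | some v =>
        if v ≠ -1 then some (v, dp)
        else
          match (PySem.List.pyRange 1 (min X n + 1) 1).foldl
              (fun acc i => acc.bind fun p =>
                (pvGoA fuel (X - i) n p.2).map fun q =>
                  (PySem.Int.mod (p.1 + PySem.Int.mod q.1 pvMod) pvMod, q.2))
              (some ((0 : Int), dp)) with
          | none => none
          | some p => some (p.1, PySem.List.pySetD p.2 X p.1)
            -- dp[X] = ans : the earlier pyGet? succeeded, so X is in range and pySetD is exact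

def findTotalPath (X : Int) (n : Int) (dp : List Int) : Int :=
  (pvGoA (X.toNat + 1) X n dp).elim 0 Prod.fst

-- ===== PORT B =====
-- the table-building loop of Source B; state = (f, window); f grows by one entry per
-- loop step, exactly as Source B appends.
def pvGoBloop (X : Int) (n : Int) (dp : List Int) : Option Int :=
    ((PySem.List.pyRange 1 (X + 1) 1).foldl
        (fun acc k => acc.bind fun fw =>
          (PySem.List.pyGet? dp k).map fun v =>
            let fk := if v ≠ -1 then v else PySem.Int.mod fw.2 pvMod
            let w' := if 1 ≤ n then
                        fw.2 + fk - (if n ≤ k then fw.1.getD (k - n).toNat 0 else 0)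
                      else fw.2
            -- f[k-n] : 0 ≤ k-n < len f always holds here, so getD is exact
            (fw.1 ++ [fk], w'))
        (some (([1] : List Int), if 1 ≤ n then (1 : Int) else 0))).bind
      fun fw => PySem.List.pyGet? fw.1 X

def pvGoB (X : Int) (n : Int) (dp : List Int) : Option Int :=
  if X < 0 then some 0
  else if 0 < X then
    match PySem.List.pyGet? dp X with
    | none => none                    -- dp[X] raises IndexError
    | some v => if v ≠ -1 then some v else pvGoBloop X n dp
  else pvGoBloop X n dp

def findTotalPath_alt (X : Int) (n : Int) (dp : List Int) : Int :=
  (pvGoB X n dp).getD 0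

-- ===== PRECONDITION & SPEC =====
-- Pre_ excludes exactly the inputs where A raises IndexError: X ≥ 1 needs X < len(dp)
-- (dp[X] and all memo reads), X < 0 needs -X ≤ len(dp) (negative-index read).
def Pre_findTotalPath (X : Int) (n : Int) (dp : List Int) : Prop :=
  X = 0 ∨ (0 < X ∧ X < (dp.length : Int)) ∨ (X < 0 ∧ -X ≤ (dp.length : Int))
instance (X : Int) (n : Int) (dp : List Int) : Decidable (Pre_findTotalPath X n dp) := by
  unfold Pre_findTotalPath; infer_instance

def pvWitness_findTotalPath : Int × Int × List Int := (3, 2, [-1, -1, -1, -1])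

-- For negative X (with -X ≤ len(dp)) A returns whatever Python's negative-index
-- wraparound finds in the memo table (dp[len+X], or 0 when that entry is the -1
-- sentinel); B returns 0, the intended number of paths to a negative sum.
def D_findTotalPath (X : Int) (n : Int) (dp : List Int) : Prop :=
  X < 0 ∧ -X ≤ (dp.length : Int) ∧
    dp.getD ((dp.length : Int) + X).toNat 0 ≠ -1 ∧
    dp.getD ((dp.length : Int) + X).toNat 0 ≠ 0
instance (X : Int) (n : Int) (dp : List Int) : Decidable (D_findTotalPath X n dp) := by
  unfold D_findTotalPath; infer_instance

def Spec_findTotalPath (X : Int) (n : Int) (dp : List Int) (out : Int) : Prop :=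
  ¬ D_findTotalPath X n dp → out = findTotalPath_alt X n dp
instance (X : Int) (n : Int) (dp : List Int) (out : Int) : Decidable (Spec_findTotalPath X n dp out) := by
  unfold Spec_findTotalPath; infer_instance

def pvDiffWitness_findTotalPath : Int × Int × List Int := (-1, 1, [5])
def pvDiffWitnessOut_findTotalPath : Int × Int := (5, 0)

-- ===== CLAIM (what is proved, stated in full; the proofs are below) =====
def Claim_unchanged_findTotalPath : Prop := ∀ (X : Int) (n : Int) (dp : List Int), Dom_findTotalPath X n dp → Pre_findTotalPath X n dp → Spec_findTotalPath X n dp (findTotalPath X n dp)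
def Claim_changed_findTotalPath : Prop := Dom_findTotalPath (pvDiffWitness_findTotalPath.1) (pvDiffWitness_findTotalPath.2.1) (pvDiffWitness_findTotalPath.2.2) ∧ Pre_findTotalPath (pvDiffWitness_findTotalPath.1) (pvDiffWitness_findTotalPath.2.1) (pvDiffWitness_findTotalPath.2.2) ∧ D_findTotalPath (pvDiffWitness_findTotalPath.1) (pvDiffWitness_findTotalPath.2.1) (pvDiffWitness_findTotalPath.2.2) ∧ findTotalPath (pvDiffWitness_findTotalPath.1) (pvDiffWitness_findTotalPath.2.1) (pvDiffWitness_findTotalPath.2.2) = pvDiffWitnessOut_findTotalPath.1 ∧ findTotalPath_alt (pvDiffWitness_findTotalPath.1) (pvDiffWitness_findTotalPath.2.1) (pvDiffWitness_findTotalPath.2.2) = pvDiffWitnessOut_findTotalPath.2 ∧ pvDiffWitnessOut_findTotalPath.1 ≠ pvDiffWitnessOut_findTotalPath.2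
def Claim_exact_findTotalPath : Prop := ∀ (X : Int) (n : Int) (dp : List Int), Dom_findTotalPath X n dp → Pre_findTotalPath X n dp → D_findTotalPath X n dp → findTotalPath X n dp ≠ findTotalPath_alt X n dp

-- ===== LEMMAS AND PROOFS =====

-- the mathematical value both programs compute, defined from the INITIAL dp:
-- pvF dp n k = dp[k] if k ≥ 1 and dp[k] ≠ -1, else the windowed sum of previous values mod pvMod;
-- pvS is its prefix sum.
mutual
def pvF (dp : List Int) (n : Int) : Nat → Int
  | 0 => 1
  | k+1 =>
    if dp.getD (k+1) 0 = -1 then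
      PySem.Int.mod (pvS dp n (k+1) - pvS dp n (k+1 - (min ((k : Int)+1) n).toNat)) pvMod
    else dp.getD (k+1) 0
  termination_by k => 2 * k + 1
  decreasing_by all_goals omega
def pvS (dp : List Int) (n : Int) : Nat → Int
  | 0 => 0
  | t+1 => pvS dp n t + pvF dp n t
  termination_by t => 2 * t
  decreasing_by all_goals omega
end

lemma pvMod_pos : (0 : Int) < pvMod := by norm_num [pvMod]

lemma pvF_zero (dp : List Int) (n : Int) : pvF dp n 0 = 1 := by rw [pvF]

lemma pvF_succ (dp : List Int) (n : Int) (k : Nat) :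
    pvF dp n (k+1) =
      if dp.getD (k+1) 0 = -1 then
        PySem.Int.mod (pvS dp n (k+1) - pvS dp n (k+1 - (min ((k : Int)+1) n).toNat)) pvMod
      else dp.getD (k+1) 0 := by rw [pvF]

lemma pvS_zero (dp : List Int) (n : Int) : pvS dp n 0 = 0 := by rw [pvS]

lemma pvS_succ (dp : List Int) (n : Int) (t : Nat) :
    pvS dp n (t+1) = pvS dp n t + pvF dp n t := by rw [pvS]

lemma pvGetD_set_self (xs : List Int) (k : Nat) (v : Int) (h : k < xs.length) :
    (xs.set k v).getD k 0 = v := by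
  rw [List.getD_eq_getElem?_getD, List.getElem?_set_self (by omega)]; rfl

lemma pvGetD_set_ne (xs : List Int) (k j : Nat) (v : Int) (h : k ≠ j) :
    (xs.set k v).getD j 0 = xs.getD j 0 := by
  rw [List.getD_eq_getElem?_getD, List.getElem?_set_ne h, ← List.getD_eq_getElem?_getD]

lemma pvGetD_map_range (f : Nat → Int) (n k : Nat) (h : k < n) :
    ((List.range n).map f).getD k 0 = f k := by
  rw [List.getD_eq_getElem?_getD, List.getElem?_map, List.getElem?_range h]; rfl

lemma pvPyGet?_getD (xs : List Int) (i : Int) (h0 : 0 ≤ i) (h : i < (xs.length : Int)) :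
    PySem.List.pyGet? xs i = some (xs.getD i.toNat 0) := by
  rw [PySem.List.pyGet?_eq_some_getElem xs h0 h, List.getD_eq_getElem?_getD,
    List.getElem?_eq_getElem (by omega)]
  rfl

lemma pvMod_zero : PySem.Int.mod 0 pvMod = 0 := by
  rw [PySem.Int.mod_eq_emod_of_pos pvMod_pos]; rfl

-- memo-table invariant: dp agrees with the initial dp0 except that some -1 slots
-- may have been overwritten with the correct value pvF.
def pvInv (dp0 dp : List Int) (n : Int) : Prop :=
  dp.length = dp0.length ∧ ∀ k, k < dp0.length →
    dp.getD k 0 = dp0.getD k 0 ∨ (dp0.getD k 0 = -1 ∧ dp.getD k 0 = pvF dp0 n k)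

lemma pvGoA_correct (dp0 : List Int) (n : Int) :
    ∀ (fuel : Nat) (X : Int) (dp : List Int), 0 ≤ X → X.toNat < fuel →
      (X = 0 ∨ X < (dp0.length : Int)) → pvInv dp0 dp n →
      ∃ dp', pvGoA fuel X n dp = some (pvF dp0 n X.toNat, dp') ∧ pvInv dp0 dp' n := by
  intro fuel
  induction fuel with
  | zero => intro X dp hX hf _ _; omega
  | succ fuel ih =>
    intro X dp hX hf hlen hinv
    by_cases hX0 : X = 0
    · subst hX0
      exact ⟨dp, by simp [pvGoA, pvF], hinv⟩
    · have hX1 : 1 ≤ X := by omega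
      have hlen' : X < (dp0.length : Int) := hlen.resolve_left hX0
      have hXdp : X < (dp.length : Int) := by rw [hinv.1]; exact hlen'
      have hget : PySem.List.pyGet? dp X = some (dp.getD X.toNat 0) :=
        pvPyGet?_getD dp X (by omega) hXdp
      obtain ⟨k, hk⟩ : ∃ k, X.toNat = k + 1 := ⟨X.toNat - 1, by omega⟩
      have hkX : ((k : Int) + 1) = X := by omega
      have hinvX := hinv.2 X.toNat (by omega)
      by_cases hvm : dp.getD X.toNat 0 = -1
      · have hdp0X : dp0.getD X.toNat 0 = -1 := by
          rcases hinvX with h | h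
          · rw [← h]; exact hvm
          · exact h.1
        have hFX : pvF dp0 n X.toNat =
            PySem.Int.mod (pvS dp0 n X.toNat - pvS dp0 n (X.toNat - (min X n).toNat)) pvMod := by
          rw [hk, pvF_succ, if_pos (by rw [← hk]; exact hdp0X), hkX, ← hk]
        have hloop : ∀ (t : Nat), (t = 0 ∨ (t : Int) ≤ min X n) →
            ∃ dp', (PySem.List.pyRange 1 ((t : Int)+1) 1).foldl
                (fun acc i => acc.bind fun p =>
                  (pvGoA fuel (X - i) n p.2).map fun q =>
                    (PySem.Int.mod (p.1 + PySem.Int.mod q.1 pvMod) pvMod, q.2))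
                (some ((0 : Int), dp)) =
              some (PySem.Int.mod (pvS dp0 n X.toNat - pvS dp0 n (X.toNat - t)) pvMod, dp') ∧
              pvInv dp0 dp' n := by
          intro t
          induction t with
          | zero =>
            intro _
            refine ⟨dp, ?_, hinv⟩
            rw [show (((0:Nat) : Int) + 1) = 1 by norm_num, PySem.List.pyRange_one_eq_nil le_rfl]
            simp [pvMod_zero]
          | succ t iht =>
            intro ht
            have htm : ((t : Int) + 1) ≤ min X n := by
              rcases ht with h | h
              · exact absurd h (by omega)
              · push_cast at h; exact_mod_cast h
            have hminX : min X n ≤ X := min_le_left _ _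
            obtain ⟨dp', hfold, hinv'⟩ := iht (Or.inr (by omega))
            have hsplit : PySem.List.pyRange 1 (((t+1 : Nat) : Int)+1) 1 =
                PySem.List.pyRange 1 ((t : Int)+1) 1 ++ [(t : Int)+1] := by
              push_cast
              exact PySem.List.pyRange_one_succ_right (by omega)
            rw [hsplit, List.foldl_append, hfold]
            have htX : (t : Int) + 1 ≤ X := le_trans htm hminX
            have hXi0 : 0 ≤ X - ((t : Int)+1) := by omega
            have hfuel' : (X - ((t : Int)+1)).toNat < fuel := by omega
            have hlen'' : (X - ((t : Int)+1) = 0 ∨ X - ((t : Int)+1) < (dp0.length : Int)) := by omega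
            obtain ⟨dp'', hrec, hinv''⟩ := ih (X - ((t : Int)+1)) dp' hXi0 hfuel' hlen'' hinv'
            refine ⟨dp'', ?_, hinv''⟩
            simp only [List.foldl_cons, List.foldl_nil, Option.bind_some, hrec, Option.map_some]
            have harg : (X - ((t : Int)+1)).toNat = X.toNat - (t+1) := by omega
            have hsub : X.toNat - t = (X.toNat - (t+1)) + 1 := by omega
            rw [harg, hsub, pvS_succ]
            have hme : ∀ a b : Int,
                PySem.Int.mod (PySem.Int.mod a pvMod + PySem.Int.mod b pvMod) pvMod
                  = PySem.Int.mod (a + b) pvMod := by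
              intro a b
              simp only [PySem.Int.mod_eq_emod_of_pos pvMod_pos]
              simp only [pvMod]
              omega
            rw [hme]
            have hfin : pvS dp0 n X.toNat - (pvS dp0 n (X.toNat - (t+1)) + pvF dp0 n (X.toNat - (t+1)))
                + pvF dp0 n (X.toNat - (t+1))
                = pvS dp0 n X.toNat - pvS dp0 n (X.toNat - (t+1)) := by ring
            rw [hfin]
        have hrange : (PySem.List.pyRange 1 (min X n + 1) 1) =
            PySem.List.pyRange 1 (((min X n).toNat : Int)+1) 1 := by
          by_cases h : 0 ≤ min X n
          · congr 1; omega
          · rw [PySem.List.pyRange_one_eq_nil (by omega), PySem.List.pyRange_one_eq_nil (by omega)]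
        obtain ⟨dp', hfold, hinv'⟩ := hloop (min X n).toNat (by omega)
        refine ⟨PySem.List.pySetD dp' X (pvF dp0 n X.toNat), ?_, ?_⟩
        · rw [pvGoA, if_neg hX0, hget]
          dsimp only
          rw [if_neg (not_not_intro hvm), hrange, hfold]
          dsimp only
          rw [← hFX]
        · constructor
          · rw [PySem.List.pySetD_of_nonneg _ _ (by omega), List.length_set]; exact hinv'.1
          · intro j hj
            rw [PySem.List.pySetD_of_nonneg _ _ (by omega)]
            by_cases hjX : j = X.toNat
            · subst hjX
              exact Or.inr ⟨hdp0X, pvGetD_set_self _ _ _ (by rw [hinv'.1]; omega)⟩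
            · rw [pvGetD_set_ne _ _ _ _ (fun h => hjX h.symm)]
              exact hinv'.2 j hj
      · have hval : dp.getD X.toNat 0 = pvF dp0 n X.toNat := by
          rcases hinvX with h | h
          · rw [hk, pvF_succ, if_neg (by rw [← hk, ← h]; exact hvm), ← hk, ← h]
          · exact h.2
        refine ⟨dp, ?_, hinv⟩
        rw [pvGoA, if_neg hX0, hget]
        dsimp only
        rw [if_pos hvm, hval]

lemma pvGoBloop_correct (dp : List Int) (n X : Int) (h0 : 0 ≤ X)
    (hlen : X = 0 ∨ X < (dp.length : Int)) :
    pvGoBloop X n dp = some (pvF dp n X.toNat) := by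
  have main : ∀ (t : Nat), (t : Int) ≤ X →
      (PySem.List.pyRange 1 ((t : Int)+1) 1).foldl
        (fun acc k => acc.bind fun fw =>
          (PySem.List.pyGet? dp k).map fun v =>
            let fk := if v ≠ -1 then v else PySem.Int.mod fw.2 pvMod
            let w' := if 1 ≤ n then
                        fw.2 + fk - (if n ≤ k then fw.1.getD (k - n).toNat 0 else 0)
                      else fw.2
            (fw.1 ++ [fk], w'))
        (some (([1] : List Int), if 1 ≤ n then (1 : Int) else 0)) =
      some ((List.range (t+1)).map (pvF dp n),
            if 1 ≤ n then pvS dp n (t+1) - pvS dp n (t+1 - n.toNat) else 0) := by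
    intro t
    induction t with
    | zero =>
      intro _
      rw [show (((0:Nat) : Int) + 1) = 1 by norm_num, PySem.List.pyRange_one_eq_nil le_rfl]
      simp only [List.foldl_nil]
      split_ifs with hn
      · have h1 : 1 - n.toNat = 0 := by omega
        rw [h1, pvS_succ, pvS_zero, pvF_zero]
        norm_num [pvF_zero]
      · norm_num [pvF_zero]
    | succ t iht =>
      intro ht
      have htX : (t : Int) + 1 ≤ X := by push_cast at ht; omega
      have hXlen : X < (dp.length : Int) := hlen.resolve_left (by omega)
      have hsplit : PySem.List.pyRange 1 (((t+1 : Nat) : Int)+1) 1 =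
          PySem.List.pyRange 1 ((t : Int)+1) 1 ++ [(t : Int)+1] := by
        push_cast
        exact PySem.List.pyRange_one_succ_right (by omega)
      rw [hsplit, List.foldl_append, iht (by omega)]
      simp only [List.foldl_cons, List.foldl_nil, Option.bind_some]
      rw [pvPyGet?_getD dp ((t : Int)+1) (by omega) (by omega)]
      simp only [Option.map_some]
      have hidx : ((t : Int)+1).toNat = t+1 := by omega
      rw [hidx]
      have hfk : (if dp.getD (t+1) 0 ≠ -1 then dp.getD (t+1) 0
          else PySem.Int.mod (if 1 ≤ n then pvS dp n (t+1) - pvS dp n (t+1 - n.toNat) else 0) pvMod)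
          = pvF dp n (t+1) := by
        rw [pvF_succ]
        by_cases hv : dp.getD (t+1) 0 = -1
        · rw [if_neg (not_not_intro hv), if_pos hv]
          by_cases hn : 1 ≤ n
          · rw [if_pos hn]
            have : t+1 - (min ((t : Int)+1) n).toNat = t+1 - n.toNat := by omega
            rw [this]
          · rw [if_neg hn]
            have h1 : (min ((t : Int)+1) n).toNat = 0 := by omega
            rw [h1, Nat.sub_zero, sub_self]
        · rw [if_pos hv, if_neg hv]
      rw [hfk]
      have hftab : (List.range (t+1+1)).map (pvF dp n) =
          (List.range (t+1)).map (pvF dp n) ++ [pvF dp n (t+1)] := by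
        rw [List.range_succ, List.map_append, List.map_cons, List.map_nil]
      rw [hftab]
      refine congrArg some (Prod.ext rfl ?_)
      by_cases hn : 1 ≤ n
      · by_cases hkn : n ≤ (t : Int)+1
        · simp only [if_pos hn, if_pos hkn]
          have hidx2 : ((t : Int)+1 - n).toNat = t+1 - n.toNat := by omega
          rw [hidx2, pvGetD_map_range _ _ _ (by omega)]
          have e1 : t+1+1 - n.toNat = (t+1-n.toNat) + 1 := by omega
          rw [e1, pvS_succ dp n (t+1), pvS_succ dp n (t+1-n.toNat)]
          ring
        · simp only [if_pos hn, if_neg hkn]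
          have e0 : t+1 - n.toNat = 0 := by omega
          have e0' : t+1+1 - n.toNat = 0 := by omega
          rw [e0, e0', pvS_succ dp n (t+1)]
          ring
      · simp only [if_neg hn]
  unfold pvGoBloop
  have hXt : ((X.toNat : Nat) : Int) + 1 = X + 1 := by omega
  have := main X.toNat (by omega)
  rw [hXt] at this
  rw [this]
  simp only [Option.bind_some]
  rw [PySem.List.pyGet?_of_nonneg _ h0, List.getElem?_map, List.getElem?_range (by omega)]
  rfl

lemma pvGoB_correct (dp : List Int) (n X : Int) (h0 : 0 ≤ X)
    (hlen : X = 0 ∨ X < (dp.length : Int)) :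
    pvGoB X n dp = some (pvF dp n X.toNat) := by
  unfold pvGoB
  rw [if_neg (by omega)]
  by_cases hX0 : 0 < X
  · have hXlen : X < (dp.length : Int) := hlen.resolve_left (by omega)
    rw [if_pos hX0, pvPyGet?_getD dp X (by omega) hXlen]
    dsimp only
    by_cases hv : dp.getD X.toNat 0 = -1
    · rw [if_neg (not_not_intro hv)]
      exact pvGoBloop_correct dp n X h0 hlen
    · rw [if_pos hv]
      obtain ⟨k, hk⟩ : ∃ k, X.toNat = k + 1 := ⟨X.toNat - 1, by omega⟩
      rw [hk, pvF_succ, if_neg (by rw [← hk]; exact hv), ← hk]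
  · rw [if_neg hX0]
    exact pvGoBloop_correct dp n X h0 hlen

lemma pvA_eq_pvF (X n : Int) (dp : List Int) (h0 : 0 ≤ X)
    (hlen : X = 0 ∨ X < (dp.length : Int)) :
    findTotalPath X n dp = pvF dp n X.toNat := by
  obtain ⟨dp', h, -⟩ :=
    pvGoA_correct dp n (X.toNat + 1) X dp h0 (by omega) hlen
      ⟨rfl, fun k _ => Or.inl rfl⟩
  unfold findTotalPath
  rw [h]
  rfl

lemma pvB_eq_pvF (X n : Int) (dp : List Int) (h0 : 0 ≤ X)
    (hlen : X = 0 ∨ X < (dp.length : Int)) :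
    findTotalPath_alt X n dp = pvF dp n X.toNat := by
  unfold findTotalPath_alt
  rw [pvGoB_correct dp n X h0 hlen]
  rfl

lemma pvB_neg (X n : Int) (dp : List Int) (hX : X < 0) : findTotalPath_alt X n dp = 0 := by
  unfold findTotalPath_alt pvGoB
  rw [if_pos hX]
  rfl

lemma pvA_neg (X n : Int) (dp : List Int) (hX : X < 0) (hlen : -X ≤ (dp.length : Int)) :
    findTotalPath X n dp =
      (if dp.getD ((dp.length : Int) + X).toNat 0 = -1 then 0
       else dp.getD ((dp.length : Int) + X).toNat 0) := by
  have hfuel : X.toNat + 1 = 1 := by omega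
  have hlt : dp.length - (-X).toNat < dp.length := by omega
  have hget : PySem.List.pyGet? dp X = some (dp.getD ((dp.length : Int) + X).toNat 0) := by
    have hXk : X = -(((-X).toNat : Nat) : Int) := by omega
    rw [hXk, PySem.List.pyGet?_neg_natCast dp (-X).toNat (by omega) (by omega),
      List.getElem?_eq_getElem hlt]
    have hidx : ((dp.length : Int) + -(((-X).toNat : Nat) : Int)).toNat = dp.length - (-X).toNat := by
      omega
    rw [hidx, List.getD_eq_getElem?_getD, List.getElem?_eq_getElem hlt]
    rfl
  unfold findTotalPath
  rw [hfuel, pvGoA, if_neg (by omega), hget]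
  dsimp only
  have hmin : min X n ≤ X := min_le_left _ _
  by_cases hv : dp.getD ((dp.length : Int) + X).toNat 0 = -1
  · rw [if_neg (not_not_intro hv), if_pos hv, PySem.List.pyRange_one_eq_nil (by omega)]
    rfl
  · rw [if_pos hv, if_neg hv]
    rfl

-- ===== VERDICT (by name: the statement is the Claim_ definition above) =====
theorem findTotalPath_spec : Claim_unchanged_findTotalPath := by
  intro X n dp _ hpre
  unfold Spec_findTotalPath
  intro hD
  rcases hpre with h0 | ⟨h1, h2⟩ | ⟨h1, h2⟩
  · subst h0
    rw [pvA_eq_pvF 0 n dp le_rfl (Or.inl rfl), pvB_eq_pvF 0 n dp le_rfl (Or.inl rfl)]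
  · rw [pvA_eq_pvF X n dp (by omega) (Or.inr h2), pvB_eq_pvF X n dp (by omega) (Or.inr h2)]
  · rw [pvB_neg X n dp h1, pvA_neg X n dp h1 h2]
    unfold D_findTotalPath at hD
    by_cases hv : dp.getD ((dp.length : Int) + X).toNat 0 = -1
    · rw [if_pos hv]
    · rw [if_neg hv]
      by_contra hne
      exact hD ⟨h1, h2, hv, hne⟩

set_option maxRecDepth 4000 in
theorem findTotalPath_changed : Claim_changed_findTotalPath := by
  unfold Claim_changed_findTotalPath; decide

theorem findTotalPath_tight : Claim_exact_findTotalPath := by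
  intro X n dp _ hpre hD
  obtain ⟨h1, h2, h3, h4⟩ := hD
  rw [pvA_neg X n dp h1 h2, pvB_neg X n dp h1, if_neg h3]
  exact h4
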